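-- pv_equiv track=rewrite | github.com/troy2331/Algorithm | ProGreedy2큰수만들기.py | solution
-- ===== SOURCE A (Python) =====
-- def solution(number, k):
--     answer = ''
--     # 젤 작은숫자부터 K개 제거하고, 순서는 그대로 출력하면 됨
--     A = []
--     C = []
--     for i in range(len(number)):
--         A.append(number[i])
--     C = sorted(A)
--     for j in range(k): # k 번 제거하자
--         B = C.pop(0)
--         for m in range(len(A)):
--             if A[m] == B:
--                 A.pop(m)
--                 break
--             else:
--                 continue
--     for _ in A:
--         answer += _
--
--     return answer
-- ===== SOURCE B (Python) =====
-- def solution(number, k):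
--     # Counting strategy: tally each character, greedily allocate the k removals
--     # to the smallest character values, then delete in one left-to-right pass.
--     counts = {}
--     for ch in number:
--         counts[ch] = counts.get(ch, 0) + 1
--     remove = {}
--     remaining = k
--     for v in range(128):
--         if remaining <= 0:
--             break
--         ch = chr(v)
--         c = counts.get(ch, 0)
--         if c > 0:
--             t = c if c < remaining else remaining
--             remove[ch] = t
--             remaining -= t
--     out = []
--     for ch in number:
--         if remove.get(ch, 0) > 0:
--             remove[ch] = remove[ch] - 1
--         else:
--             out.append(ch)
--     return ''.join(out)
-- ===== Notes on version B (the rewrite author's own statement) =====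
-- stated objective: faster
-- what changed: Replaces the sort plus k repeated linear scans (pop smallest, find-and-remove) by a counting pass over characters, a greedy allocation of the k removals over the 128 ASCII values, and one left-to-right deletion pass.
import Mathlib
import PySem

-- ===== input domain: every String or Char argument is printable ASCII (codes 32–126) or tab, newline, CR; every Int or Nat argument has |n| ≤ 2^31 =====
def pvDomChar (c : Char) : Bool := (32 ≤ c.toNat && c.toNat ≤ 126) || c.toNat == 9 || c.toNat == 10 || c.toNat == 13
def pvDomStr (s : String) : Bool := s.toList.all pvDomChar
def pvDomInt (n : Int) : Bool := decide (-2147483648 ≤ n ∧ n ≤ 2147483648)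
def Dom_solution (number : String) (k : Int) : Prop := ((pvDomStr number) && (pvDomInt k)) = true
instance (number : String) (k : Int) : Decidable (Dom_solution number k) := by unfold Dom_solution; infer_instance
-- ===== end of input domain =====

-- B replaces A's sort + k find-and-remove scans by a counting pass, a greedy
-- allocation of the k removals over the 128 ASCII values, and one deletion pass.

-- ===== PORT A =====
-- inner loop 'for m in range(len(A)): if A[m] == B: A.pop(m); break'
def pvPopFirstEq (b : Char) : List Char → List Char
  | [] => []
  | x :: xs => if x = b then xs else x :: pvPopFirstEq b xs

-- outer loop 'for j in range(k): B = C.pop(0); <inner loop>'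
-- (when C is exhausted Python raises IndexError; those inputs are outside Pre_)
def pvLoopA : Nat → List Char → List Char → List Char
  | 0, A, _ => A
  | Nat.succ n, A, C =>
    match C with
    | [] => A
    | b :: rest => pvLoopA n (pvPopFirstEq b A) rest

def solution (number : String) (k : Int) : String :=
  -- A = []; for i in range(len(number)): A.append(number[i])
  let A := (PySem.List.pyRange 0 (PySem.Str.len number) 1).foldl
      (fun acc i => acc ++ [PySem.List.pyGetD number.toList i ' ']) []
  -- C = sorted(A)
  let C := PySem.List.sorted A (fun x => x) false
  let A' := pvLoopA k.toNat A C
  -- answer = ''; for _ in A: answer += _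
  String.mk (A'.foldl (fun acc c => acc ++ [c]) [])

-- ===== PORT B =====
def solution_alt (number : String) (k : Int) : String :=
  -- counts = {}; for ch in number: counts[ch] = counts.get(ch, 0) + 1
  let counts := number.toList.foldl
      (fun (d : PySem.Dict Char Int) ch => d.insert ch (d.getD ch 0 + 1)) PySem.Dict.empty
  -- remove = {}; remaining = k; for v in range(128): …
  let st := (PySem.List.pyRange 0 128 1).foldl
      (fun (p : PySem.Dict Char Int × Int) v =>
        if p.2 ≤ 0 then p          -- 'break': state is unchanged for the rest of the range
        else
          let ch := Char.ofNat v.toNat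
          let c := counts.getD ch 0
          if c > 0 then
            let t := if c < p.2 then c else p.2
            (p.1.insert ch t, p.2 - t)
          else p)
      (PySem.Dict.empty, k)
  -- out = []; for ch in number: …
  let out := number.toList.foldl
      (fun (p : List Char × PySem.Dict Char Int) ch =>
        if p.2.getD ch 0 > 0 then (p.1, p.2.insert ch (p.2.getD ch 0 - 1))
        else (p.1 ++ [ch], p.2))
      ([], st.1)
  -- return ''.join(out)
  String.mk out.1

-- ===== PRECONDITION & SPEC =====
-- A raises IndexError (C.pop(0) on the exhausted sorted list) iff k > len(number);
-- Pre_ excludes exactly those inputs.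
def Pre_solution (number : String) (k : Int) : Prop := k ≤ (number.toList.length : Int)
instance (number : String) (k : Int) : Decidable (Pre_solution number k) := by
  unfold Pre_solution; infer_instance

def pvWitness_solution : String × Int := ("4177252841", 4)

def Spec_solution (number : String) (k : Int) (out : String) : Prop := out = solution_alt number k
instance (number : String) (k : Int) (out : String) : Decidable (Spec_solution number k out) := by
  unfold Spec_solution; infer_instance

-- ===== CLAIM (what is proved, stated in full; the proofs are below) =====
def Claim_equal_solution : Prop := ∀ (number : String) (k : Int), Dom_solution number k → Pre_solution number k → Spec_solution number k (solution number k)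

-- ===== LEMMAS AND PROOFS =====

-- the common middle form: remove, scanning left to right, the first (f c) occurrences
-- of every character c
def pvRemoveScan : List Char → (Char → Nat) → List Char
  | [], _ => []
  | c :: xs, f =>
    if f c > 0 then pvRemoveScan xs (fun d => if d = c then f d - 1 else f d)
    else c :: pvRemoveScan xs f

-- how many copies of c the k smallest characters of A contain
def pvBudget (n : Nat) (A : List Char) (c : Char) : Nat :=
  ((PySem.List.sorted A (fun x => x) false).take n).count c

theorem pvRemoveScan_congr (A : List Char) (f g : Char → Nat) (h : ∀ c, f c = g c) :
    pvRemoveScan A f = pvRemoveScan A g := by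
  induction A generalizing f g with
  | nil => rfl
  | cons c xs ih =>
    simp only [pvRemoveScan, h c]
    split
    · exact ih _ _ (fun d => by by_cases hd : d = c <;> simp [hd, h])
    · rw [ih _ _ h]

theorem pvRemoveScan_zero (A : List Char) : pvRemoveScan A (fun _ => 0) = A := by
  induction A with
  | nil => rfl
  | cons c xs ih => simpa [pvRemoveScan] using ih

theorem char_eq_iff_toNat (c d : Char) : c = d ↔ c.toNat = d.toNat := by
  constructor <;> intro h
  · rw [h]
  · exact Char.ext (UInt32.toNat_inj.mp h)

theorem char_lt_iff_toNat (c d : Char) : c < d ↔ c.toNat < d.toNat := by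
  rw [Char.lt_def]; exact UInt32.lt_iff_toNat_lt

theorem char_toNat_ofNat (v : Nat) (h : v < 128) : (Char.ofNat v).toNat = v := by
  simp only [Char.ofNat, Char.toNat]
  rw [dif_pos (by omega : v < 55296 ∨ 57343 < v ∧ v < 1114112)]
  simp

-- removing one m up front folds into the scan budget
theorem pvRemoveScan_erase (A : List Char) (f : Char → Nat) (m : Char) (hm : m ∈ A) :
    pvRemoveScan A (fun c => if c = m then f c + 1 else f c) = pvRemoveScan (A.erase m) f := by
  induction A generalizing f with
  | nil => cases hm
  | cons c xs ih =>
    by_cases hcm : c = m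
    · subst hcm
      rw [List.erase_cons_head]
      simp only [pvRemoveScan, if_true]
      rw [if_pos (Nat.succ_pos _)]
      exact pvRemoveScan_congr _ _ _ (fun d => by by_cases hd : d = c <;> simp [hd])
    · have hmxs : m ∈ xs := by cases hm with
        | head => exact absurd rfl hcm
        | tail _ h => exact h
      have herase : (c :: xs).erase m = c :: xs.erase m := by
        rw [List.erase_cons_tail]; simp [hcm]
      rw [herase]
      simp only [pvRemoveScan, if_neg hcm]
      by_cases hfc : f c > 0
      · rw [if_pos hfc, if_pos hfc]
        refine (pvRemoveScan_congr _ _ _ ?_).trans (ih (fun d => if d = c then f d - 1 else f d) hmxs)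
        intro d
        by_cases hd : d = c
        · subst hd; simp [hcm]
        · by_cases hdm : d = m
          · subst hdm; simp [hd]
          · simp [hd, hdm]
      · rw [if_neg hfc, if_neg hfc, ih f hmxs]

-- pvPopFirstEq is List.erase
theorem pvPopFirstEq_eq_erase (b : Char) (A : List Char) : pvPopFirstEq b A = A.erase b := by
  induction A with
  | nil => rfl
  | cons x xs ih =>
    simp only [pvPopFirstEq, List.erase_cons]
    by_cases h : x = b <;> simp [h, ih]

-- head of sorted is removed: tail is the sorted erase
theorem sorted_erase (A : List Char) (m : Char) (rest : List Char)
    (h : PySem.List.sorted A (fun x => x) false = m :: rest) :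
    PySem.List.sorted (A.erase m) (fun x => x) false = rest := by
  have hperm : (m :: rest).Perm A := by
    have := PySem.List.sorted_perm A (fun x => x) false
    rwa [h] at this
  have hpA : rest.Perm (A.erase m) := by
    have := hperm.erase m
    simpa using this
  have hpw : rest.Pairwise (fun a b => a ≤ b) := by
    have := PySem.List.sorted_pairwise A (fun x => x)
    rw [h] at this
    exact (List.pairwise_cons.mp this).2
  exact PySem.List.sorted_id_eq_of_perm_of_pairwise _ _ hpA hpw

-- MAIN A-side: the pop-smallest loop is the scan with the take-n budget
theorem pvLoopA_eq_removeScan (n : Nat) (A : List Char) :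
    pvLoopA n A (PySem.List.sorted A (fun x => x) false) = pvRemoveScan A (pvBudget n A) := by
  induction n generalizing A with
  | zero =>
    rw [show pvBudget 0 A = fun _ => 0 from funext (fun c => by simp [pvBudget])]
    rw [pvRemoveScan_zero]
    rfl
  | succ n ih =>
    cases h : PySem.List.sorted A (fun x => x) false with
    | nil =>
      have : A = [] := (PySem.List.sorted_eq_nil_iff A (fun x => x) false).mp h
      subst this; rfl
    | cons m rest =>
      have hmem : m ∈ A := by
        have := PySem.List.mem_sorted A (fun x => x) false m
        rw [h] at this
        exact this.mp List.mem_cons_self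
      have hrest := sorted_erase A m rest h
      simp only [pvLoopA, pvPopFirstEq_eq_erase]
      rw [← hrest, ih (A.erase m)]
      rw [← pvRemoveScan_erase A (pvBudget n (A.erase m)) m hmem]
      refine (pvRemoveScan_congr _ _ _ (fun c => ?_))
      simp only [pvBudget, h, hrest, List.take_succ_cons, List.count_cons]
      by_cases hc : c = m
      · simp [hc]
      · simp [hc, Ne.symm hc]

-- count in a sorted prefix, as a min with the strictly-smaller count
theorem count_take_sorted (S : List Char) (hS : S.Pairwise (fun a b => a ≤ b)) (c : Char) (n : Nat) :
    (S.take n).count c = min (S.count c) (n - S.countP (fun x => decide (x < c))) := by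
  induction S generalizing n with
  | nil => simp
  | cons a S' ih =>
    obtain ⟨hpw, hS'⟩ := List.pairwise_cons.mp hS
    cases n with
    | zero => simp
    | succ n =>
      simp only [List.take_succ_cons, List.count_cons, List.countP_cons, ih hS' n]
      rcases lt_trichotomy a c with hac | hac | hac
      · have h1 : (a == c) = false := beq_eq_false_iff_ne.mpr (ne_of_lt hac)
        simp [h1, hac]
      · subst hac
        have hnone : S'.countP (fun x => decide (x < a)) = 0 := by
          rw [List.countP_eq_zero]
          intro x hx
          simpa using not_lt.mpr (hpw x hx)
        simp [hnone]
      · have hzero : S'.count c = 0 := by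
          rw [List.count_eq_zero]
          intro hc
          exact absurd (lt_of_lt_of_le hac (hpw c hc)) (lt_irrefl c)
        have hz2 : (S'.take n).count c = 0 := by
          rw [List.count_eq_zero]
          intro hc
          exact absurd (lt_of_lt_of_le hac (hpw c (List.mem_of_mem_take hc))) (lt_irrefl c)
        have h1 : (a == c) = false := beq_eq_false_iff_ne.mpr (ne_of_lt hac).symm
        rw [hz2] at *
        simp [h1, hzero, not_lt.mpr (le_of_lt hac)]

-- pvBudget in closed form over the unsorted list
theorem pvBudget_eq_min (n : Nat) (A : List Char) (c : Char) :
    pvBudget n A c = min (A.count c) (n - A.countP (fun x => decide (x < c))) := by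
  have hperm := PySem.List.sorted_perm A (fun x => x) false
  rw [pvBudget, count_take_sorted _ (PySem.List.sorted_pairwise A (fun x => x)) c n,
      hperm.count_eq, hperm.countP_eq]

-- counting characters below a value bound
def pvCntLt (A : List Char) (v : Nat) : Nat := A.countP (fun c => decide (c.toNat < v))

theorem pvCntLt_succ (A : List Char) (v : Nat) (hv : v < 128) :
    pvCntLt A (v + 1) = pvCntLt A v + A.count (Char.ofNat v) := by
  induction A with
  | nil => rfl
  | cons a A' ih =>
    simp only [pvCntLt, List.countP_cons, List.count_cons] at *
    rw [ih]
    have hco : (Char.ofNat v).toNat = v := char_toNat_ofNat v hv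
    by_cases ha : a.toNat = v
    · have : a = Char.ofNat v := (char_eq_iff_toNat a _).mpr (by rw [hco, ha])
      simp [this, hco]
      omega
    · have hne : (a == Char.ofNat v) = false := by
        refine beq_eq_false_iff_ne.mpr (fun hh => ha ?_)
        rw [hh, hco]
      by_cases h1 : a.toNat < v
      · simp [hne, h1, Nat.lt_succ_of_lt h1]
        omega
      · have h2 : ¬ a.toNat < v + 1 := by omega
        simp [hne, h1, h2]

-- countP with a char bound equals countP with the value-order bound
theorem countP_lt_char (A : List Char) (ch : Char) :
    A.countP (fun x => decide (x < ch)) = pvCntLt A ch.toNat := by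
  unfold pvCntLt
  apply List.countP_congr
  intro x _
  simp [char_lt_iff_toNat]

-- the big-step value of B's remove dictionary entries, as an Int
def pvRmVal (A : List Char) (k : Int) (c : Char) : Int :=
  if k ≤ 0 then 0 else min (A.count c : Int) (max (k - (pvCntLt A c.toNat : Int)) 0)

-- B-side invariant for the greedy allocation loop over range(128)
theorem pvGreedy_inv (A : List Char) (k : Int)
    (counts : PySem.Dict Char Int) (hc : ∀ ch, counts.getD ch 0 = (A.count ch : Int)) :
    ∀ v : Nat, v ≤ 128 →
    (((PySem.List.pyRange 0 (v : Int) 1).foldl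
      (fun (p : PySem.Dict Char Int × Int) w =>
        if p.2 ≤ 0 then p
        else
          let ch := Char.ofNat w.toNat
          let c := counts.getD ch 0
          if c > 0 then
            let t := if c < p.2 then c else p.2
            (p.1.insert ch t, p.2 - t)
          else p)
      (PySem.Dict.empty, k)).2 = (if k ≤ 0 then k else max (k - (pvCntLt A v : Int)) 0))
    ∧ (∀ ch : Char, ((PySem.List.pyRange 0 (v : Int) 1).foldl
      (fun (p : PySem.Dict Char Int × Int) w =>
        if p.2 ≤ 0 then p
        else
          let ch := Char.ofNat w.toNat
          let c := counts.getD ch 0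
          if c > 0 then
            let t := if c < p.2 then c else p.2
            (p.1.insert ch t, p.2 - t)
          else p)
      (PySem.Dict.empty, k)).1.getD ch 0 = if ch.toNat < v then pvRmVal A k ch else 0) := by
  intro v
  induction v with
  | zero =>
    intro _
    simp only [Nat.cast_zero, PySem.List.pyRange_one_eq_nil (le_refl (0 : Int)), List.foldl_nil]
    constructor
    · simp [pvCntLt]
      omega
    · intro ch
      simp [PySem.Dict.getD_empty]
  | succ v ihv =>
    intro hv1
    obtain ⟨ih1, ih2⟩ := ihv (by omega)
    have hv : v < 128 := by omega
    have hcast : ((v + 1 : Nat) : Int) = (v : Nat) + 1 := by push_cast; ring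
    rw [hcast, PySem.List.pyRange_one_succ_right (by positivity), List.foldl_append,
        List.foldl_cons, List.foldl_nil]
    have htn : ((v : Int)).toNat = v := by omega
    have hcnt : pvCntLt A (v + 1) = pvCntLt A v + A.count (Char.ofNat v) := pvCntLt_succ A v hv
    have hofn : (Char.ofNat v).toNat = v := char_toNat_ofNat v hv
    -- the characters with value exactly v are exactly Char.ofNat v
    have hchar : ∀ ch : Char, ch.toNat = v ↔ ch = Char.ofNat v := by
      intro ch
      rw [char_eq_iff_toNat, hofn]
    by_cases hk : k ≤ 0
    · rw [if_pos (by rw [ih1]; simp [hk])]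
      constructor
      · rw [ih1]; simp [hk]
      · intro ch
        rw [ih2 ch]
        simp [pvRmVal, hk]
    · -- k > 0
      by_cases hstop : max (k - (pvCntLt A v : Int)) 0 ≤ 0
      · -- remaining is exhausted: the step is a no-op
        rw [if_pos (by rw [ih1, if_neg hk]; exact hstop)]
        have hkle : k ≤ (pvCntLt A v : Int) := by omega
        constructor
        · rw [ih1, if_neg hk]
          rw [hcnt]
          push_cast
          omega
        · intro ch
          rw [ih2 ch]
          by_cases h1 : ch.toNat < v
          · simp [h1, (by omega : ch.toNat < v + 1)]
          · by_cases h2 : ch.toNat < v + 1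
            · have hev : ch = Char.ofNat v := (hchar ch).mp (by omega)
              have : pvRmVal A k ch = 0 := by
                unfold pvRmVal
                rw [if_neg hk]
                have : (pvCntLt A ch.toNat : Int) = (pvCntLt A v : Int) := by
                  rw [hev, hofn]
                omega
              simp [h1, h2, this]
            · simp [h1, h2]
      · -- remaining > 0
        rw [if_neg (by rw [ih1, if_neg hk]; exact hstop)]
        simp only []
        have hkgt : (pvCntLt A v : Int) < k := by omega
        rw [htn, hc (Char.ofNat v), ih1, if_neg hk]
        by_cases hcv : ((A.count (Char.ofNat v) : Int) > 0)
        · rw [if_pos hcv]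
          constructor
          · simp only []
            rw [hcnt]
            push_cast
            split_ifs <;> omega
          · intro ch
            by_cases hev : ch = Char.ofNat v
            · rw [hev, PySem.Dict.getD_insert_self]
              rw [if_pos (show (Char.ofNat v).toNat < v + 1 by rw [hofn]; omega)]
              unfold pvRmVal
              rw [if_neg hk, hofn]
              split_ifs <;> omega
            · rw [PySem.Dict.getD_insert_of_ne _ _ _ hev, ih2 ch]
              have hne : ¬ ch.toNat = v := fun hh => hev ((hchar ch).mp hh)
              by_cases h1 : ch.toNat < v
              · rw [if_pos h1, if_pos (show ch.toNat < v + 1 by omega)]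
              · rw [if_neg h1, if_neg (show ¬ ch.toNat < v + 1 by omega)]
        · rw [if_neg hcv]
          have hc0 : A.count (Char.ofNat v) = 0 := by omega
          constructor
          · rw [ih1, if_neg hk, if_neg hk, hcnt, hc0]
            simp
          · intro ch
            rw [ih2 ch]
            by_cases h1 : ch.toNat < v
            · simp [h1, (by omega : ch.toNat < v + 1)]
            · by_cases h2 : ch.toNat < v + 1
              · have hev : ch = Char.ofNat v := (hchar ch).mp (by omega)
                have : pvRmVal A k ch = 0 := by
                  unfold pvRmVal
                  rw [if_neg hk, hev, hofn, hc0]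
                  simp
                simp [h1, h2, this]
              · simp [h1, h2]


-- B-side deletion pass equals pvRemoveScan while the dict mirrors a Nat budget
theorem pvScan_inv (A : List Char) (acc : List Char) (r : PySem.Dict Char Int) (g : Char → Nat)
    (hg : ∀ ch, r.getD ch 0 = (g ch : Int)) :
    (A.foldl (fun (p : List Char × PySem.Dict Char Int) ch =>
        if p.2.getD ch 0 > 0 then (p.1, p.2.insert ch (p.2.getD ch 0 - 1))
        else (p.1 ++ [ch], p.2)) (acc, r)).1 = acc ++ pvRemoveScan A g := by
  induction A generalizing acc r g with
  | nil => simp [pvRemoveScan]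
  | cons c xs ih =>
    simp only [List.foldl_cons, pvRemoveScan]
    by_cases h : g c > 0
    · rw [if_pos (by rw [hg c]; exact_mod_cast h), if_pos h]
      exact ih acc (r.insert c (r.getD c 0 - 1)) (fun d => if d = c then g d - 1 else g d)
        (fun d => by
          by_cases hd : d = c
          · subst hd
            rw [PySem.Dict.getD_insert_self]
            simp [hg d]
            omega
          · rw [PySem.Dict.getD_insert_of_ne _ _ _ hd, hg d]
            simp [hd])
    · rw [if_neg (by rw [hg c]; simpa using h), if_neg h]
      rw [ih (acc ++ [c]) r g hg, List.append_assoc]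
      rfl

-- the dictionary entry computed by the greedy loop is exactly the take-k budget
theorem pvRmVal_eq_budget (A : List Char) (k : Int) (hA : ∀ c ∈ A, c.toNat < 128) (ch : Char) :
    (if ch.toNat < 128 then pvRmVal A k ch else 0) = (pvBudget k.toNat A ch : Int) := by
  rw [pvBudget_eq_min, countP_lt_char]
  by_cases h : ch.toNat < 128
  · rw [if_pos h]
    unfold pvRmVal
    by_cases hk : k ≤ 0
    · rw [if_pos hk]
      have : k.toNat = 0 := by omega
      rw [this]
      simp
    · rw [if_neg hk]
      push_cast
      omega
  · rw [if_neg h]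
    have hnot : ch ∉ A := fun hc => h (hA ch hc)
    rw [List.count_eq_zero.mpr hnot]
    simp

-- ===== VERDICT (by name: the statement is the Claim_ definition above) =====
theorem solution_spec : Claim_equal_solution := by
  intro number k hDom _hPre
  unfold Spec_solution
  have hA128 : ∀ c ∈ number.toList, c.toNat < 128 := by
    intro c hcmem
    unfold Dom_solution pvDomStr at hDom
    rw [Bool.and_eq_true] at hDom
    have := (List.all_eq_true.mp hDom.1) c hcmem
    unfold pvDomChar at this
    simp only [Bool.or_eq_true, Bool.and_eq_true, decide_eq_true_eq, beq_iff_eq] at this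
    omega
  -- A's value
  have hAside : solution number k
      = String.mk (pvRemoveScan number.toList (pvBudget k.toNat number.toList)) := by
    unfold solution
    simp only []
    have hlen : PySem.Str.len number = ((number.toList.length : Nat) : Int) := by
      simp [PySem.Str.len_eq]
    rw [hlen, PySem.List.foldl_pyRange_zero_pyGetD' number.toList ' ' (fun acc x => acc ++ [x]) [],
        PySem.List.foldl_append_singleton number.toList [], List.nil_append,
        pvLoopA_eq_removeScan k.toNat number.toList,
        PySem.List.foldl_append_singleton, List.nil_append]
  -- B's value
  have hBside : solution_alt number k
      = String.mk (pvRemoveScan number.toList (pvBudget k.toNat number.toList)) := by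
    unfold solution_alt
    simp only []
    have hc : ∀ ch, (number.toList.foldl
        (fun (d : PySem.Dict Char Int) ch => d.insert ch (d.getD ch 0 + 1))
        PySem.Dict.empty).getD ch 0 = (number.toList.count ch : Int) := by
      intro ch
      rw [PySem.Dict.getD_foldl_insert_add_one, PySem.Dict.getD_empty]
      simp
    have h128 : (128 : Int) = ((128 : Nat) : Int) := by norm_num
    rw [h128]
    have hg := pvGreedy_inv number.toList k _ hc 128 (le_refl 128)
    rw [pvScan_inv number.toList [] _ (pvBudget k.toNat number.toList)
      (fun ch => by rw [hg.2 ch]; exact pvRmVal_eq_budget number.toList k hA128 ch)]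
    rw [List.nil_append]
  rw [hAside, hBside]
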